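-- pv_equiv track=rewrite | github.com/npt-1707/Defect-Prediction-Tool | main/auto_extract/utils/utils.py | split_diff_log
-- ===== SOURCE A (Python) =====
-- def split_diff_log(file_diff_log):
--     """
--     Split the log of a commit into a list of diff
--     """
--     files_log, file_log = [], []
--     for line in file_diff_log:
--         if line[:10] == "diff --git":
--             if file_log:
--                 files_log.append(file_log)
--                 file_log = []
--
--         file_log.append(line)
--
--     if file_log:
--         files_log.append(file_log)
--
--     return files_log
-- ===== SOURCE B (Python) =====
-- def split_diff_log(file_diff_log):
--     """
--     Split the log of a commit into a list of diff
--     """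
--     rev_groups = []
--     for line in reversed(file_diff_log):
--         # a line joins the group below it unless that group already starts
--         # with a "diff --git" marker (markers always open a group)
--         if rev_groups and not rev_groups[-1][-1].startswith("diff --git"):
--             rev_groups[-1].append(line)
--         else:
--             rev_groups.append([line])
--     return [g[::-1] for g in reversed(rev_groups)]
-- ===== Notes on version B (the rewrite author's own statement) =====
-- stated objective: alternative
-- what changed: Replaces the forward accumulate-and-flush buffer with a single right-to-left pass that merges each line into the group below it unless that group is already headed by a 'diff --git' marker, then reverses groups and lines once at the end.
import Mathlib
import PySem

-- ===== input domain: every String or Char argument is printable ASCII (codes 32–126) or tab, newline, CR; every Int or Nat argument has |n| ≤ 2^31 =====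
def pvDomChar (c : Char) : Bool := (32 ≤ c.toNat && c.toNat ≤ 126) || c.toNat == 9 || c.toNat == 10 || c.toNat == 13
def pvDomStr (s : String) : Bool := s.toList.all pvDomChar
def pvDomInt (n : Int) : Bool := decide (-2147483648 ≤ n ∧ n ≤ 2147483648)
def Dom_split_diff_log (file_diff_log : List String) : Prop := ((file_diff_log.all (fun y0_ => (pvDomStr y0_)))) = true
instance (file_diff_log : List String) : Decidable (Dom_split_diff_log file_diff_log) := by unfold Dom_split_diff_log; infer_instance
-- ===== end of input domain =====

-- B replaces A's forward accumulate-and-flush buffer with a single right-to-left pass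
-- (merge each line into the group below unless that group starts with a marker), then
-- one final reversal of groups and lines; objective: alternative decomposition, same cost.


-- ===== PORT A =====
-- one loop step of A: `if line[:10] == "diff --git": if file_log: flush` then `file_log.append(line)`
def pvStepA (st : List (List String) × List String) (line : String) :
    List (List String) × List String :=
  let st := if PySem.Str.slice line none (some 10) == "diff --git" then
      (if st.2.isEmpty then st else (st.1 ++ [st.2], ([] : List String)))
    else st
  (st.1, st.2 ++ [line])

def split_diff_log (file_diff_log : List String) : List (List String) :=
  let st := file_diff_log.foldl pvStepA ([], [])
  if st.2.isEmpty then st.1 else st.1 ++ [st.2]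

-- ===== PORT B =====
-- one loop step of B over reversed(file_diff_log):
-- `if rev_groups and not rev_groups[-1][-1].startswith("diff --git"): rev_groups[-1].append(line) else: rev_groups.append([line])`
-- (rev_groups[-1] is read via getLast?; its [-1] element via PySem.List.pyGet? · (-1), total
--  with getD "" — every built group is nonempty, so Python never raises there)
def pvStepB (gs : List (List String)) (line : String) : List (List String) :=
  match gs.getLast? with
  | some g =>
    if !(PySem.Str.startswith ((PySem.List.pyGet? g (-1)).getD "") "diff --git") then
      gs.dropLast ++ [g ++ [line]]
    else gs ++ [[line]]
  | none => gs ++ [[line]]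

def split_diff_log_alt (file_diff_log : List String) : List (List String) :=
  let revGroups := file_diff_log.reverse.foldl pvStepB []
  -- [g[::-1] for g in reversed(rev_groups)]
  (revGroups.reverse).map (fun g => (PySem.List.slice? g none none (-1)).getD [])

-- ===== PRECONDITION & SPEC =====
def Spec_split_diff_log (file_diff_log : List String) (out : List (List String)) : Prop := out = split_diff_log_alt file_diff_log
instance (file_diff_log : List String) (out : List (List String)) : Decidable (Spec_split_diff_log file_diff_log out) := by unfold Spec_split_diff_log; infer_instance

-- ===== CLAIM (what is proved, stated in full; the proofs are below) =====
def Claim_equal_split_diff_log : Prop := ∀ (file_diff_log : List String), Dom_split_diff_log file_diff_log → Spec_split_diff_log file_diff_log (split_diff_log file_diff_log)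

-- ===== LEMMAS AND PROOFS =====

-- the marker test, as B writes it
def pvIsMark (line : String) : Bool := PySem.Str.startswith line "diff --git"

-- A's test `line[:10] == "diff --git"` is the same Boolean as B's startswith test
theorem pvMarkA_eq (line : String) :
    (PySem.Str.slice line none (some 10) == "diff --git") = pvIsMark line := by
  rw [Bool.eq_iff_iff]
  rw [beq_iff_eq, pvIsMark, PySem.Str.startswith_eq, PySem.Chars.startswith_iff]
  constructor
  · intro h
    rw [List.prefix_iff_eq_take]
    have := congrArg String.toList h
    rw [PySem.Str.toList_slice, PySem.Chars.slice_eq_listSlice] at this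
    rw [show ((10 : Int) = ((10 : Nat) : Int)) by norm_num, PySem.List.slice_to_natCast] at this
    simpa using this.symm
  · intro h
    rw [List.prefix_iff_eq_take] at h
    apply String.ext
    rw [PySem.Str.toList_slice, PySem.Chars.slice_eq_listSlice]
    rw [show ((10 : Int) = ((10 : Nat) : Int)) by norm_num, PySem.List.slice_to_natCast]
    simpa using h.symm

-- common reference splitter: each group is its first line plus the following non-marker lines
def pvChunks : List String → List (List String)
  | [] => []
  | x :: xs =>
    (x :: xs.takeWhile (fun l => !pvIsMark l)) :: pvChunks (xs.dropWhile (fun l => !pvIsMark l))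
  termination_by l => l.length
  decreasing_by
    have := List.length_dropWhile_le (fun l => !pvIsMark l) xs
    simp only [List.length_cons]; omega

theorem pvChunks_nil : pvChunks [] = [] := by rw [pvChunks]

theorem pvChunks_cons' (x : String) (xs : List String) :
    pvChunks (x :: xs) =
      (x :: xs.takeWhile (fun l => !pvIsMark l))
        :: pvChunks (xs.dropWhile (fun l => !pvIsMark l)) := by
  rw [pvChunks]

-- ===== A = pvChunks =====
theorem pvA_loop (rest : List String) :
    ∀ (acc : List (List String)) (cur : List String), cur ≠ [] →
    (fun st => if st.2.isEmpty then st.1 else st.1 ++ [st.2]) (rest.foldl pvStepA (acc, cur))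
      = acc ++ (cur ++ rest.takeWhile (fun l => !pvIsMark l))
          :: pvChunks (rest.dropWhile (fun l => !pvIsMark l)) := by
  induction rest with
  | nil =>
    intro acc cur hcur
    simp [pvChunks_nil, List.isEmpty_iff, hcur]
  | cons r rs ih =>
    intro acc cur hcur
    have hstep : pvStepA (acc, cur) r =
        if pvIsMark r then (acc ++ [cur], [r]) else (acc, cur ++ [r]) := by
      simp only [pvStepA, pvMarkA_eq]
      cases h : pvIsMark r <;> simp [List.isEmpty_iff, hcur]
    cases h : pvIsMark r with
    | true =>
      rw [List.foldl_cons, hstep, h, if_pos rfl]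
      rw [ih (acc ++ [cur]) [r] (by simp)]
      simp [h, pvChunks_cons']
    | false =>
      rw [List.foldl_cons, hstep, h]
      simp only [Bool.false_eq_true, if_false]
      have H := ih acc (cur ++ [r]) (by simp)
      simp only [List.takeWhile_cons, List.dropWhile_cons, h] at H ⊢
      simpa using H

theorem pvA_eq_chunks (l : List String) : split_diff_log l = pvChunks l := by
  cases l with
  | nil => simp [split_diff_log, pvChunks_nil]
  | cons x xs =>
    have h1 : pvStepA ([], []) x = ([], [x]) := by
      simp only [pvStepA]; split <;> simp
    show (fun st => if st.2.isEmpty then st.1 else st.1 ++ [st.2])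
        ((x :: xs).foldl pvStepA ([], [])) = _
    rw [List.foldl_cons, h1, pvA_loop xs [] [x] (by simp)]
    simp [pvChunks_cons']

-- ===== B = pvChunks (mapped through the reversed representation) =====

-- unfolding pvChunks one cons at the front, phrased as B's merge rule
theorem pvChunks_cons (x : String) (xs : List String) :
    pvChunks (x :: xs) =
      match pvChunks xs with
      | [] => [[x]]
      | g :: gs => if pvIsMark (g.headD "") then [x] :: g :: gs else (x :: g) :: gs := by
  cases xs with
  | nil => rw [pvChunks_cons', pvChunks_nil]; simp [pvChunks_nil]
  | cons y ys =>
    rw [pvChunks_cons', pvChunks_cons' y ys]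
    cases h : pvIsMark y with
    | true => simp [h, pvChunks_cons']
    | false => simp [List.takeWhile_cons, List.dropWhile_cons, h]

theorem pvGet_neg_one_concat (g : List String) (a : String) :
    (PySem.List.pyGet? (g ++ [a]) (-1)).getD "" = a := by
  simp [PySem.List.pyGet?, PySem.List.pyIdx?]

theorem pvB_foldr (l : List String) :
    l.foldr (fun line gs => pvStepB gs line) [] = ((pvChunks l).map List.reverse).reverse := by
  induction l with
  | nil => simp [pvChunks_nil]
  | cons x xs ih =>
    rw [List.foldr_cons, ih, pvChunks_cons]
    cases hc : pvChunks xs with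
    | nil => simp [pvStepB]
    | cons g gs =>
      -- head group g of pvChunks xs is nonempty: it is xs.head :: …
      obtain ⟨y, g', rfl⟩ : ∃ y g', g = y :: g' := by
        cases xs with
        | nil => rw [pvChunks_nil] at hc; exact absurd hc (by simp)
        | cons z zs =>
          rw [pvChunks_cons'] at hc
          exact ⟨z, _, (List.cons_eq_cons.mp hc).1.symm⟩
      have hcond : ∀ b : List String,
          PySem.Str.startswith ((PySem.List.pyGet? (b ++ [y]) (-1)).getD "") "diff --git"
            = pvIsMark y := by
        intro b; rw [pvGet_neg_one_concat, pvIsMark]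
      simp only [List.map_cons, List.reverse_cons, pvStepB, List.getLast?_concat, hcond]
      cases h : pvIsMark y with
      | true => simp [h, List.headD]
      | false => simp [h, List.headD]

theorem pvB_eq_chunks (l : List String) : split_diff_log_alt l = pvChunks l := by
  rw [split_diff_log_alt]
  rw [List.foldl_reverse, pvB_foldr]
  simp [PySem.List.slice?_none_none_neg_one]

-- ===== VERDICT (by name: the statement is the Claim_ definition above) =====
theorem split_diff_log_spec : Claim_equal_split_diff_log := by
  intro l _
  show split_diff_log l = split_diff_log_alt l
  rw [pvA_eq_chunks, pvB_eq_chunks]
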